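-- pv_equiv track=rewrite | github.com/Trepan-Debuggers/python3-trepan | test/example/tail.py | find_line_end
-- ===== SOURCE A (Python) =====
-- def find_line_end(block, remaining):
--     """Search backwards from block for at most *remaining* \n's
--     and return tuple [position, 0] if found in this block or
--     [None, remaining] if we have more to go"""
--     last_position = len(block)
--     while remaining != 0:
--         position = block.rfind("\n", 0, last_position)
--         if position == -1: return [None, remaining]
--         remaining -= 1
--         last_position = position
--     return [last_position, 0]
-- ===== SOURCE B (Python) =====
-- def find_line_end(block, remaining):
--     """Same result as A: one forward pass builds the table of newline
--     positions, then the answer is a direct lookup instead of repeated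
--     backward rfind scans."""
--     idx = [i for i in range(len(block)) if block[i] == "\n"]
--     if remaining == 0:
--         return [len(block), 0]
--     if 0 < remaining <= len(idx):
--         return [idx[-remaining], 0]
--     return [None, remaining - len(idx)]
-- ===== Notes on version B (the rewrite author's own statement) =====
-- stated objective: alternative
-- what changed: Replaces the repeated backward rfind scans with a single forward pass that collects all newline positions into a table, then answers by one direct (negative-index) lookup or arithmetic on the table length.
import Mathlib
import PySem

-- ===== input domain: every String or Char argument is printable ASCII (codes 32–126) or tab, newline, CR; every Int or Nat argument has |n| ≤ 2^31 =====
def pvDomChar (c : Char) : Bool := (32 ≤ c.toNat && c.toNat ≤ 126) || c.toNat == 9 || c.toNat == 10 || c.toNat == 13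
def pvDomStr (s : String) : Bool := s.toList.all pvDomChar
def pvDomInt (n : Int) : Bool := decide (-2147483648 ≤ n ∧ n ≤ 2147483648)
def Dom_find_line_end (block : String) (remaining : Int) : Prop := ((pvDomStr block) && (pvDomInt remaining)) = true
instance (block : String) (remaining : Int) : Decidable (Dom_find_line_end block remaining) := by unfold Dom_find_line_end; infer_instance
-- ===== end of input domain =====

-- B replaces A's repeated backward rfind scans by one forward pass that tabulates
-- the newline positions, answering with a single table lookup; equivalence is proved on the whole domain.

-- ===== PORT A =====
-- block.rfind("\n", 0, hi): backward scan for the highest index i < hi with block[i] = '\n',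
-- -1 if none. Exact for this call shape (single-char needle, bounds 0 ≤ hi ≤ len(block)).
def rfindNL (cs : List Char) : Nat → Int
  | 0 => -1
  | n + 1 => if cs.getD n ' ' = '\n' then (n : Int) else rfindNL cs n

theorem rfindNL_lt {cs : List Char} {hi p : Nat} (h : rfindNL cs hi = (p : Int)) : p < hi := by
  induction hi with
  | zero => simp [rfindNL] at h
  | succ n ih =>
    unfold rfindNL at h
    split at h
    · have : p = n := by exact_mod_cast h.symm
      omega
    · exact Nat.lt_succ_of_lt (ih h)

-- the while-loop of A, state = (remaining, last_position)
def loopA (cs : List Char) (remaining : Int) (last_position : Nat) : List (Option Int) :=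
  if remaining = 0 then [some (last_position : Int), some 0]
  else
    match h : rfindNL cs last_position with
    | .negSucc _ => [none, some remaining]                 -- position == -1
    | .ofNat p => loopA cs (remaining - 1) p
termination_by last_position
decreasing_by exact rfindNL_lt h

def find_line_end (block : String) (remaining : Int) : List (Option Int) :=
  loopA block.toList remaining block.toList.length

-- ===== PORT B =====
def find_line_end_alt (block : String) (remaining : Int) : List (Option Int) :=
  let cs := block.toList
  -- idx = [i for i in range(len(block)) if block[i] == "\n"]
  let idx : List Int := ((List.range cs.length).filter (fun i => cs.getD i ' ' = '\n')).map Int.ofNat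
  if remaining = 0 then [some (cs.length : Int), some 0]
  else if 0 < remaining ∧ remaining ≤ idx.length then [PySem.List.pyGet? idx (-remaining), some 0]
  else [none, some (remaining - idx.length)]

-- ===== PRECONDITION & SPEC =====
def Spec_find_line_end (block : String) (remaining : Int) (out : List (Option Int)) : Prop := out = find_line_end_alt block remaining
instance (block : String) (remaining : Int) (out : List (Option Int)) : Decidable (Spec_find_line_end block remaining out) := by unfold Spec_find_line_end; infer_instance

-- ===== CLAIM (what is proved, stated in full; the proofs are below) =====
def Claim_equal_find_line_end : Prop := ∀ (block : String) (remaining : Int), Dom_find_line_end block remaining → Spec_find_line_end block remaining (find_line_end block remaining)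

-- ===== LEMMAS AND PROOFS =====

theorem rfindNL_cases (cs : List Char) (hi : Nat) :
    rfindNL cs hi = -1 ∨ ∃ p : Nat, rfindNL cs hi = (p : Int) ∧ p < hi := by
  induction hi with
  | zero => left; rfl
  | succ n ih =>
    have hun : rfindNL cs (n + 1) = if cs.getD n ' ' = '\n' then (n : Int) else rfindNL cs n := rfl
    by_cases hc : cs.getD n ' ' = '\n'
    · right; exact ⟨n, by rw [hun, if_pos hc], Nat.lt_succ_self n⟩
    · rcases ih with h | ⟨p, hp, hlt⟩
      · left; rw [hun, if_neg hc, h]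
      · right; exact ⟨p, by rw [hun, if_neg hc, hp], Nat.lt_succ_of_lt hlt⟩

-- descending list of newline positions below hi, as the A-loop discovers them
def descL (cs : List Char) (hi : Nat) : List Nat :=
  match h : rfindNL cs hi with
  | .negSucc _ => []
  | .ofNat p => p :: descL cs p
termination_by hi
decreasing_by exact rfindNL_lt h

theorem descL_neg {cs : List Char} {hi : Nat} (h : rfindNL cs hi = -1) : descL cs hi = [] := by
  rw [descL]
  split
  · rfl
  · rename_i p hp
    rw [h] at hp
    simp only [Int.ofNat_eq_natCast] at hp
    omega

theorem descL_pos {cs : List Char} {hi p : Nat} (h : rfindNL cs hi = (p : Int)) :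
    descL cs hi = p :: descL cs p := by
  rw [descL]
  split
  · rename_i k hk
    rw [h] at hk
    simp only [Int.negSucc_eq] at hk
    omega
  · rename_i q hq
    rw [h] at hq
    simp only [Int.ofNat_eq_natCast] at hq
    have : q = p := by omega
    subst this; rfl

theorem loopA_zero (cs : List Char) (hi : Nat) : loopA cs 0 hi = [some (hi : Int), some 0] := by
  rw [loopA]; simp

theorem loopA_neg {cs : List Char} {hi : Nat} {remaining : Int} (hr : remaining ≠ 0)
    (h : rfindNL cs hi = -1) : loopA cs remaining hi = [none, some remaining] := by
  rw [loopA, if_neg hr]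
  split
  · rfl
  · rename_i p hp
    rw [h] at hp
    simp only [Int.ofNat_eq_natCast] at hp
    omega

theorem loopA_pos {cs : List Char} {hi p : Nat} {remaining : Int} (hr : remaining ≠ 0)
    (h : rfindNL cs hi = (p : Int)) : loopA cs remaining hi = loopA cs (remaining - 1) p := by
  rw [loopA, if_neg hr]
  split
  · rename_i k hk
    rw [h] at hk
    simp only [Int.negSucc_eq] at hk
    omega
  · rename_i q hq
    rw [h] at hq
    simp only [Int.ofNat_eq_natCast] at hq
    have : q = p := by omega
    subst this; rfl

-- characterization of A's loop by the descending newline table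
theorem loopA_char (cs : List Char) (hi : Nat) :
    ∀ remaining : Int, remaining ≠ 0 →
    loopA cs remaining hi =
      if 0 < remaining ∧ remaining ≤ ((descL cs hi).length : Int)
      then [some (((descL cs hi).getD (remaining.toNat - 1) 0 : Nat) : Int), some 0]
      else [none, some (remaining - (descL cs hi).length)] := by
  induction hi using Nat.strong_induction_on with
  | _ hi ih =>
    intro remaining hr
    rcases rfindNL_cases cs hi with h | ⟨p, h, hlt⟩
    · rw [loopA_neg hr h, descL_neg h]
      rw [if_neg (by simp only [List.length_nil]; push_cast; omega)]
      simp
    · rw [loopA_pos hr h, descL_pos h]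
      by_cases h1 : remaining = 1
      · subst h1
        have h10 : (1 : Int) - 1 = 0 := rfl
        rw [h10, loopA_zero]
        rw [if_pos ⟨by norm_num, by simp only [List.length_cons]; push_cast; omega⟩]
        norm_num
      · have key : (0 < remaining - 1 ∧ remaining - 1 ≤ ((descL cs p).length : Int)) ↔
            (0 < remaining ∧ remaining ≤ (((p :: descL cs p).length : Nat) : Int)) := by
          simp only [List.length_cons]; push_cast; omega
        rw [ih p hlt (remaining - 1) (by omega)]
        by_cases hcond : 0 < remaining - 1 ∧ remaining - 1 ≤ ((descL cs p).length : Int)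
        · rw [if_pos hcond, if_pos (key.mp hcond)]
          have hidx : remaining.toNat - 1 = ((remaining - 1).toNat - 1) + 1 := by omega
          rw [hidx, List.getD_cons_succ]
        · rw [if_neg hcond, if_neg (fun hcc => hcond (key.mpr hcc))]
          have harith : remaining - 1 - ((descL cs p).length : Int)
              = remaining - (((p :: descL cs p).length : Nat) : Int) := by
            simp only [List.length_cons]; push_cast; ring
          rw [harith]

-- forward table of newline positions below hi
def fwd (cs : List Char) (hi : Nat) : List Nat :=
  (List.range hi).filter (fun i => cs.getD i ' ' = '\n')

theorem fwd_succ (cs : List Char) (n : Nat) :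
    fwd cs (n + 1) = fwd cs n ++ (if cs.getD n ' ' = '\n' then [n] else []) := by
  simp [fwd, List.range_succ, List.filter_append]
  split <;> simp_all

theorem descL_succ (cs : List Char) (n : Nat) :
    descL cs (n + 1) = if cs.getD n ' ' = '\n' then n :: descL cs n else descL cs n := by
  have hun : rfindNL cs (n + 1) = if cs.getD n ' ' = '\n' then (n : Int) else rfindNL cs n := rfl
  by_cases hc : cs.getD n ' ' = '\n'
  · have h : rfindNL cs (n + 1) = (n : Int) := by rw [hun, if_pos hc]
    rw [descL_pos h, if_pos hc]
  · have h : rfindNL cs (n + 1) = rfindNL cs n := by rw [hun, if_neg hc]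
    rw [if_neg hc]
    rcases rfindNL_cases cs n with h0 | ⟨p, hp, _⟩
    · rw [descL_neg (h.trans h0), descL_neg h0]
    · rw [descL_pos (h.trans hp), descL_pos hp]

theorem descL_eq_reverse (cs : List Char) (hi : Nat) :
    descL cs hi = (fwd cs hi).reverse := by
  induction hi with
  | zero =>
    rw [descL_neg rfl]
    simp [fwd]
  | succ n ih =>
    rw [descL_succ, fwd_succ]
    split <;> simp_all

-- ===== VERDICT (by name: the statement is the Claim_ definition above) =====
theorem find_line_end_spec : Claim_equal_find_line_end := by
  intro block remaining _
  unfold Spec_find_line_end find_line_end find_line_end_alt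
  set cs := block.toList with hcs
  simp only []
  by_cases hr : remaining = 0
  · subst hr
    rw [loopA_zero, if_pos rfl]
  · rw [loopA_char cs cs.length remaining hr, descL_eq_reverse, if_neg hr]
    have hfold : List.filter (fun i => decide (cs.getD i ' ' = '\n')) (List.range cs.length)
        = fwd cs cs.length := rfl
    rw [hfold]
    generalize fwd cs cs.length = L
    by_cases hcond : 0 < remaining ∧ remaining ≤ (L.length : Int)
    · rw [if_pos (by simpa using hcond), if_pos (by simp only [List.length_map]; exact hcond)]
      obtain ⟨h0, h2⟩ := hcond
      have hneg : -remaining = -((remaining.toNat : Nat) : Int) := by omega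
      rw [hneg, PySem.List.pyGet?_neg_natCast (L.map Int.ofNat) remaining.toNat (by omega)
            (by simp only [List.length_map]; omega)]
      have hlt : remaining.toNat - 1 < L.reverse.length := by
        simp only [List.length_reverse]; omega
      rw [List.getD_eq_getElem _ _ hlt]
      simp only [List.length_map, List.getElem?_map]
      rw [List.getElem?_eq_getElem (by omega)]
      simp only [List.getElem_reverse, Option.map_some, Int.ofNat_eq_natCast]
      have hidx : L.length - 1 - (remaining.toNat - 1) = L.length - remaining.toNat := by
        simp only [List.length_reverse] at hlt; omega
      simp only [hidx]
    · rw [if_neg (by simpa using hcond), if_neg (by simp only [List.length_map]; exact hcond)]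
      simp
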